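-- pv_equiv track=rewrite | github.com/Zessay/master-thesis | kdconv/myCoTK/dataloader/bert_dataloader.py | trim_posts
-- ===== SOURCE A (Python) =====
-- from typing import List, Optional
--
-- def trim_posts(posts: List[List[int]], allow_max_length: int):
--     """
--     根据最大长度对posts进行裁剪，从后往前
--     """
--     result_posts = []
--     reverse_posts = posts[::-1]
--     total_length = 0
--     for i, post in enumerate(reverse_posts):
--         cur_length = len(post)
--         if total_length + cur_length > allow_max_length:
--             return result_posts
--         else:
--             total_length += cur_length
--             result_posts = [post] + result_posts
--     return result_posts
-- ===== SOURCE B (Python) =====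
-- from itertools import accumulate
--
-- def trim_posts(posts, allow_max_length):
--     sums = list(accumulate(len(p) for p in reversed(posts)))
--     keep = sum(1 for s in sums if s <= allow_max_length)
--     return posts[len(posts) - keep:]
-- ===== Notes on version B (the rewrite author's own statement) =====
-- stated objective: idiomatic
-- what changed: Replaced the incremental prepend-loop with early return by a build-table decomposition: cumulative sums of reversed lengths via itertools.accumulate, count how many fit the budget, and return one direct slice of posts.
import Mathlib
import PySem

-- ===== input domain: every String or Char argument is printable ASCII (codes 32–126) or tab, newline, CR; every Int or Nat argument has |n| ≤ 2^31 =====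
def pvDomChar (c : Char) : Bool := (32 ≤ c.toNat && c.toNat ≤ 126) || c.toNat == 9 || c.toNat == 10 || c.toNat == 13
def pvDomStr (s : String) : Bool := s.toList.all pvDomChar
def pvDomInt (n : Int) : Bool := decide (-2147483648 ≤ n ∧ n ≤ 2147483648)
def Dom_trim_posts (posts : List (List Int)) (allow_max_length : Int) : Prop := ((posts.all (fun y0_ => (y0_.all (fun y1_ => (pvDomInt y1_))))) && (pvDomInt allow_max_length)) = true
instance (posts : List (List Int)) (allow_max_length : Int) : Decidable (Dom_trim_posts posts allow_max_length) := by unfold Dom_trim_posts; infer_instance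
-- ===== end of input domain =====

-- B replaces A's incremental prepend-loop with a cumulative-sums table, a count, and one slice (idiomatic; same cost).

-- ===== PORT A =====
-- A's for-loop over reverse_posts with early return, carrying (result_posts, total_length)
def trimLoopA (amax : Int) : List (List Int) → List (List Int) → Int → List (List Int)
  | [], res, _ => res
  | p :: rest, res, total =>
    if total + (p.length : Int) > amax then res
    else trimLoopA amax rest ([p] ++ res) (total + (p.length : Int))

def trim_posts (posts : List (List Int)) (allow_max_length : Int) : List (List Int) :=
  let reverse_posts := (PySem.List.slice? posts none none (-1)).getD []   -- posts[::-1]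
  trimLoopA allow_max_length reverse_posts [] 0

-- ===== PORT B =====
-- itertools.accumulate of the reversed lengths
def cumsumB : Int → List Int → List Int
  | _, [] => []
  | acc, x :: xs => (acc + x) :: cumsumB (acc + x) xs

def trim_posts_alt (posts : List (List Int)) (allow_max_length : Int) : List (List Int) :=
  let sums := cumsumB 0 (posts.reverse.map (fun p => (p.length : Int)))
  let keep : Int := ((sums.filter (fun s => s ≤ allow_max_length)).length : Int)
  PySem.List.slice posts (some ((posts.length : Int) - keep)) none

-- ===== PRECONDITION & SPEC =====
def Spec_trim_posts (posts : List (List Int)) (allow_max_length : Int) (out : List (List Int)) : Prop := out = trim_posts_alt posts allow_max_length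
instance (posts : List (List Int)) (allow_max_length : Int) (out : List (List Int)) : Decidable (Spec_trim_posts posts allow_max_length out) := by unfold Spec_trim_posts; infer_instance

-- ===== CLAIM (what is proved, stated in full; the proofs are below) =====
def Claim_equal_trim_posts : Prop := ∀ (posts : List (List Int)) (allow_max_length : Int), Dom_trim_posts posts allow_max_length → Spec_trim_posts posts allow_max_length (trim_posts posts allow_max_length)

-- ===== LEMMAS AND PROOFS =====

-- number of posts A keeps, as a recursive count over the reversed list
def kcount (amax : Int) : Int → List (List Int) → Nat
  | _, [] => 0
  | t, p :: ps => if t + (p.length : Int) > amax then 0 else kcount amax (t + (p.length : Int)) ps + 1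

theorem trimLoopA_eq (amax : Int) (l : List (List Int)) :
    ∀ (res : List (List Int)) (t : Int),
      trimLoopA amax l res t = (l.take (kcount amax t l)).reverse ++ res := by
  induction l with
  | nil => intro res t; simp [trimLoopA, kcount]
  | cons p ps ih =>
    intro res t
    by_cases h : t + (p.length : Int) > amax
    · simp [trimLoopA, kcount, h]
    · simp only [trimLoopA, kcount, if_neg h, ih]
      simp [List.take_succ_cons]

theorem cumsumB_lb (t : Int) (l : List Int) (hl : ∀ x ∈ l, 0 ≤ x) :
    ∀ s ∈ cumsumB t l, t ≤ s := by
  induction l generalizing t with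
  | nil => simp [cumsumB]
  | cons x xs ih =>
    intro s hs
    simp only [cumsumB, List.mem_cons] at hs
    have hx : 0 ≤ x := hl x (List.mem_cons_self ..)
    rcases hs with h | h
    · omega
    · have := ih (t + x) (fun y hy => hl y (List.mem_cons_of_mem _ hy)) s h
      omega

theorem kcount_eq_filter (amax : Int) (l : List (List Int)) :
    ∀ t, kcount amax t l = ((cumsumB t (l.map (fun p => (p.length : Int)))).filter (fun s => s ≤ amax)).length := by
  induction l with
  | nil => intro t; simp [kcount, cumsumB]
  | cons p ps ih =>
    intro t
    simp only [List.map_cons, cumsumB]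
    by_cases h : t + (p.length : Int) > amax
    · have hemp : ((cumsumB (t + (p.length : Int)) (ps.map (fun p => (p.length : Int)))).filter (fun s => s ≤ amax)) = [] := by
        rw [List.filter_eq_nil_iff]
        intro s hs
        have := cumsumB_lb (t + (p.length : Int)) _ (by simp) s hs
        simp only [decide_eq_true_eq]
        omega
      simp [kcount, h, hemp, show ¬ (t + (p.length : Int) ≤ amax) from by omega]
    · simp [kcount, h, show t + (p.length : Int) ≤ amax from by omega, ih]

theorem kcount_le (amax : Int) : ∀ (t : Int) (l : List (List Int)), kcount amax t l ≤ l.length := by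
  intro t l
  induction l generalizing t with
  | nil => simp [kcount]
  | cons p ps ih =>
    by_cases h : t + (p.length : Int) > amax
    · simp [kcount, h]
    · simp only [kcount, if_neg h, List.length_cons]
      exact Nat.succ_le_succ (ih _)

-- ===== VERDICT (by name: the statement is the Claim_ definition above) =====
theorem trim_posts_spec : Claim_equal_trim_posts := by
  intro posts amax _
  unfold Spec_trim_posts trim_posts trim_posts_alt
  rw [PySem.List.slice?_none_none_neg_one]
  simp only [Option.getD_some]
  rw [trimLoopA_eq, ← kcount_eq_filter, List.append_nil]
  have hkle : kcount amax 0 posts.reverse ≤ posts.length := by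
    have := kcount_le amax 0 posts.reverse; simpa using this
  rw [PySem.List.slice_from posts
    (by omega : (0:Int) ≤ (posts.length : Int) - ((kcount amax 0 posts.reverse : Nat) : Int))]
  have htoNat : (((posts.length : Int) - ((kcount amax 0 posts.reverse : Nat) : Int)).toNat)
      = posts.length - kcount amax 0 posts.reverse := by omega
  rw [htoNat, List.take_reverse]
  simp
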